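-- pv_equiv track=rewrite | github.com/kennethsmithesq-dot/DriveAnalyzer-v1.2 | TEST.py | semitone_to_note
-- ===== SOURCE A (Python) =====
-- NOTE_TO_SEMITONE = {
--     'C': 0, 'C#': 1, 'Db': 1, 'D': 2, 'D#': 3, 'Eb': 3, 'E': 4,
--     'F': 5, 'F#': 6, 'Gb': 6, 'G': 7, 'G#': 8, 'Ab': 8, 'A': 9,
--     'A#': 10, 'Bb': 10, 'B': 11
-- }
--
-- def semitone_to_note(semitone):
--     for note, val in NOTE_TO_SEMITONE.items():
--         if val == semitone and len(note) == 1: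
--             return note
--     for note, val in NOTE_TO_SEMITONE.items():
--         if val == semitone:
--             return note
--     return "C"
-- ===== SOURCE B (Python) =====
-- NOTE_TO_SEMITONE = {
--     'C': 0, 'C#': 1, 'Db': 1, 'D': 2, 'D#': 3, 'Eb': 3, 'E': 4,
--     'F': 5, 'F#': 6, 'Gb': 6, 'G': 7, 'G#': 8, 'Ab': 8, 'A': 9,
--     'A#': 10, 'Bb': 10, 'B': 11
-- }
--
-- # The twelve preferred names in semitone order: naturals where one exists,
-- # otherwise the first-listed sharp spelling of the enharmonic pair.
-- _NAMES = ("C", "C#", "D", "D#", "E", "F", "F#", "G", "G#", "A", "A#", "B")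
--
-- def semitone_to_note(semitone):
--     if 0 <= semitone < 12:
--         return _NAMES[semitone]
--     return "C"
-- ===== Notes on version B (the rewrite author's own statement) =====
-- stated objective: simpler
-- what changed: B replaces A's two sequential scans of the note->semitone dict with a single bounds-checked index into a fixed tuple of the twelve preferred names in semitone order.
import Mathlib
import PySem

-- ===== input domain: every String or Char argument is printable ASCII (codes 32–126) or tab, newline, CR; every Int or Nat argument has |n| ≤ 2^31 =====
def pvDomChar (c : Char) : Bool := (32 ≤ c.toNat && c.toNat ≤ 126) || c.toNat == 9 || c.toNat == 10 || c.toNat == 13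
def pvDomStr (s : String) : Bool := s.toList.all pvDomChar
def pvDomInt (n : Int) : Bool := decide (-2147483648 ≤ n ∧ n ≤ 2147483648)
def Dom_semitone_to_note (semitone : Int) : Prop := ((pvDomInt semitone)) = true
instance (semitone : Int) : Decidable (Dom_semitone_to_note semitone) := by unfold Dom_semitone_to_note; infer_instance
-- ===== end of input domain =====

-- B replaces A's two scans of the note table by a bounds-checked index into a fixed tuple of the twelve preferred names (objective: simpler).


-- ===== PORT A =====
-- the module constant NOTE_TO_SEMITONE (a dict, iterated in insertion order)
def noteToSemitone : List (String × Int) :=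
  [("C", 0), ("C#", 1), ("Db", 1), ("D", 2), ("D#", 3), ("Eb", 3), ("E", 4),
   ("F", 5), ("F#", 6), ("Gb", 6), ("G", 7), ("G#", 8), ("Ab", 8), ("A", 9),
   ("A#", 10), ("Bb", 10), ("B", 11)]

-- A's first loop: first note with matching value and single-character name
def scanSingle (pairs : List (String × Int)) (s : Int) : Option String :=
  match pairs with
  | [] => none
  | (note, val) :: rest =>
      if val == s && PySem.Str.len note == 1 then some note else scanSingle rest s

-- A's second loop: first note with matching value
def scanAny (pairs : List (String × Int)) (s : Int) : Option String :=
  match pairs with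
  | [] => none
  | (note, val) :: rest =>
      if val == s then some note else scanAny rest s

def semitone_to_note (semitone : Int) : String :=
  match scanSingle noteToSemitone semitone with
  | some note => note
  | none =>
      match scanAny noteToSemitone semitone with
      | some note => note
      | none => "C"

-- ===== PORT B =====
-- Source B's fixed tuple _NAMES, indexed after the bounds check (the index is then in range)
def noteNames : List String :=
  ["C", "C#", "D", "D#", "E", "F", "F#", "G", "G#", "A", "A#", "B"]

def semitone_to_note_alt (semitone : Int) : String :=
  if 0 ≤ semitone ∧ semitone < 12 then (PySem.List.pyGet? noteNames semitone).getD "C"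
  else "C"

-- ===== PRECONDITION & SPEC =====
def Spec_semitone_to_note (semitone : Int) (out : String) : Prop := out = semitone_to_note_alt semitone
instance (semitone : Int) (out : String) : Decidable (Spec_semitone_to_note semitone out) := by unfold Spec_semitone_to_note; infer_instance

-- ===== CLAIM (what is proved, stated in full; the proofs are below) =====
def Claim_equal_semitone_to_note : Prop := ∀ (semitone : Int), Dom_semitone_to_note semitone → Spec_semitone_to_note semitone (semitone_to_note semitone)

-- ===== LEMMAS AND PROOFS =====
lemma a_out_of_range (s : Int) (h : s < 0 ∨ 11 < s) : semitone_to_note s = "C" := by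
  have h0 : ((0 : Int) == s) = false := by simp; omega
  have h1 : ((1 : Int) == s) = false := by simp; omega
  have h2 : ((2 : Int) == s) = false := by simp; omega
  have h3 : ((3 : Int) == s) = false := by simp; omega
  have h4 : ((4 : Int) == s) = false := by simp; omega
  have h5 : ((5 : Int) == s) = false := by simp; omega
  have h6 : ((6 : Int) == s) = false := by simp; omega
  have h7 : ((7 : Int) == s) = false := by simp; omega
  have h8 : ((8 : Int) == s) = false := by simp; omega
  have h9 : ((9 : Int) == s) = false := by simp; omega
  have h10 : ((10 : Int) == s) = false := by simp; omega
  have h11 : ((11 : Int) == s) = false := by simp; omega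
  simp [semitone_to_note, noteToSemitone, scanSingle, scanAny,
    h0, h1, h2, h3, h4, h5, h6, h7, h8, h9, h10, h11]

-- ===== VERDICT (by name: the statement is the Claim_ definition above) =====
theorem semitone_to_note_spec : Claim_equal_semitone_to_note := by
  intro s _
  unfold Spec_semitone_to_note
  by_cases h : 0 ≤ s ∧ s ≤ 11
  · obtain ⟨h1, h2⟩ := h
    interval_cases s <;> decide
  · rw [a_out_of_range s (by omega)]
    rw [semitone_to_note_alt, if_neg (by omega)]
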